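-- pv_equiv track=rewrite | github.com/strangetom/ingredient-parser | ingredient_parser/en/preprocess.py | _remove_unit_trailing_period
-- ===== SOURCE A (Python) =====
-- def _remove_unit_trailing_period(sentence: str) -> str:
--     """Remove trailing periods from units e.g. tsp. -> tsp.
--
--     Parameters
--     ----------
--     sentence : str
--         Ingredient sentence
--
--     Returns
--     -------
--     str
--         Ingredient sentence with trailing periods from units removed
--
--     Examples
--     --------
--     >>> p = PreProcessor("")
--     >>> p._remove_unit_trailing_period("1 tsp. garlic powder")
--     "1 tsp garlic powder"
--
--     >>> p = PreProcessor("")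
--     >>> p._remove_unit_trailing_period("5 oz. chopped tomatoes")
--     "5 oz chopped tomatoes"
--     """
--     units = [
--         "tsp.",
--         "tsps.",
--         "tbsp.",
--         "tbsps.",
--         "tbs.",
--         "tb.",
--         "lb.",
--         "lbs.",
--         "oz.",
--     ]
--     units.extend([u.capitalize() for u in units])
--     for unit in units:
--         unit_no_period = unit.replace(".", "")
--         sentence = sentence.replace(unit, unit_no_period)
--
--     return sentence
-- ===== SOURCE B (Python) =====
-- def _remove_unit_trailing_period(sentence: str) -> str:
--     """Remove trailing periods from units in a single left-to-right scan.
--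
--     Instead of 18 sequential whole-string replace passes, walk the sentence
--     once; whenever one of the known unit abbreviations (with its period)
--     starts at the current position, emit it without the period and jump
--     past it, otherwise copy the character.
--     """
--     units = [
--         "tsp.",
--         "tsps.",
--         "tbsp.",
--         "tbsps.",
--         "tbs.",
--         "tb.",
--         "lb.",
--         "lbs.",
--         "oz.",
--     ]
--     units = units + [u.capitalize() for u in units]
--     out = []
--     i = 0
--     n = len(sentence)
--     while i < n:
--         for u in units:
--             if sentence.startswith(u, i):
--                 out.append(u[:-1])
--                 i += len(u)
--                 break
--         else:
--             out.append(sentence[i])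
--             i += 1
--     return "".join(out)
-- ===== Notes on version B (the rewrite author's own statement) =====
-- stated objective: alternative
-- what changed: Replaces 18 sequential whole-string str.replace passes with one left-to-right scan that matches the unit abbreviations simultaneously at each position and drops the period in place.
-- intended difference: On sentences containing one of the cascade substrings 'tsp.s.', 'tbsp.s.', 'lb.s.', 'Tsp.s.', 'Tbsp.s.' or 'Lb.s.', an earlier replace pass of A deletes a period and thereby fabricates a new unit match that a later pass also strips (e.g. A turns 'lb.s.' into 'lbs'), while B strips only units present in the original text ('lbs.'); B's single-pass behaviour is the intended one, as these double strips are an accident of A's pass ordering. — e.g. on _remove_unit_trailing_period("lb.s."): A returns "lbs", B returns "lbs."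
import Mathlib
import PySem

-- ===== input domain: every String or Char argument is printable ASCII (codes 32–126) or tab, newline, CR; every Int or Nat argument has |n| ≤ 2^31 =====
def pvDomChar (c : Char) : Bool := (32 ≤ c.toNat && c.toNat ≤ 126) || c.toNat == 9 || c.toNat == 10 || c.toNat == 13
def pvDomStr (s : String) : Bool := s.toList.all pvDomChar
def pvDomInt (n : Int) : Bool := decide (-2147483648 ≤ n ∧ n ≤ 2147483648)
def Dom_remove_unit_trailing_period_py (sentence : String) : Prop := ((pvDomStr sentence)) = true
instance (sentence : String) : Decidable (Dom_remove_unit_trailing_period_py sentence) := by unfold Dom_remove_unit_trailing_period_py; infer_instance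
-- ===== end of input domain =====

-- B replaces A's 18 sequential whole-string replace passes by one left-to-right scan that
-- matches all unit abbreviations simultaneously; on the six cascade substrings listed in D_
-- the two differ (A double-strips, see the D_ comment) and B's value is the intended one.

-- ===== PORT A =====
-- Python str.capitalize(): first char upper-cased, rest lower-cased (exact on ASCII).
def pyCapitalize (s : String) : String :=
  match s.toList with
  | [] => ""
  | c :: t => String.ofList (PySem.Chars.upperChar c :: PySem.Chars.lower t)

def remove_unit_trailing_period_py (sentence : String) : String :=
  let units : List String :=
    ["tsp.", "tsps.", "tbsp.", "tbsps.", "tbs.", "tb.", "lb.", "lbs.", "oz."]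
  let units := units ++ units.map pyCapitalize
  units.foldl
    (fun s unit => PySem.Str.replace s unit (PySem.Str.replace unit "." "")) sentence

-- ===== PORT B =====
-- Source B builds the same 18-element unit list (base list + capitalized copies).
def pvUnitsB : List (List Char) :=
  let base : List String :=
    ["tsp.", "tsps.", "tbsp.", "tbsps.", "tbs.", "tb.", "lb.", "lbs.", "oz."]
  (base ++ base.map pyCapitalize).map String.toList

-- Source B's while loop over the current position i, transcribed as recursion over the suffix
-- of the sentence, with fuel = number of remaining characters (the loop advances i by at
-- least 1 each iteration, so fuel = initial length suffices).
def pvScan : Nat → List (List Char) → List Char → List Char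
  | 0, _, _ => []
  | _ + 1, _, [] => []
  | fuel + 1, units, c :: t =>
    match units.find? (fun u => u.isPrefixOf (c :: t)) with
    | some u => u.dropLast ++ pvScan fuel units ((c :: t).drop u.length)
    | none => c :: pvScan fuel units t

def remove_unit_trailing_period_py_alt (sentence : String) : String :=
  String.ofList (pvScan sentence.toList.length pvUnitsB sentence.toList)

-- ===== PRECONDITION & SPEC =====
-- On sentences containing one of these six cascade substrings, an earlier replace pass of A
-- deletes a period and thereby fabricates a new unit occurrence that a later pass strips as
-- well (e.g. A maps "lb.s." to "lbs"), while B strips only units present in the original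
-- text ("lbs."); B's single-pass value is the intended one — the double strip is an
-- accident of A's pass ordering.
def D_remove_unit_trailing_period_py (sentence : String) : Prop :=
  PySem.Str.isIn "tsp.s." sentence = true ∨ PySem.Str.isIn "tbsp.s." sentence = true ∨
  PySem.Str.isIn "lb.s." sentence = true ∨ PySem.Str.isIn "Tsp.s." sentence = true ∨
  PySem.Str.isIn "Tbsp.s." sentence = true ∨ PySem.Str.isIn "Lb.s." sentence = true

instance (sentence : String) : Decidable (D_remove_unit_trailing_period_py sentence) := by
  unfold D_remove_unit_trailing_period_py; infer_instance

def Spec_remove_unit_trailing_period_py (sentence : String) (out : String) : Prop :=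
  ¬ D_remove_unit_trailing_period_py sentence → out = remove_unit_trailing_period_py_alt sentence

instance (sentence : String) (out : String) : Decidable (Spec_remove_unit_trailing_period_py sentence out) := by
  unfold Spec_remove_unit_trailing_period_py; infer_instance

def pvDiffWitness_remove_unit_trailing_period_py : String := "lb.s."

def pvDiffWitnessOut_remove_unit_trailing_period_py : String × String := ("lbs", "lbs.")

-- ===== CLAIM (what is proved, stated in full; the proofs are below) =====
def Claim_unchanged_remove_unit_trailing_period_py : Prop :=
  ∀ (sentence : String), Dom_remove_unit_trailing_period_py sentence →
    Spec_remove_unit_trailing_period_py sentence (remove_unit_trailing_period_py sentence)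

def Claim_changed_remove_unit_trailing_period_py : Prop :=
  Dom_remove_unit_trailing_period_py (pvDiffWitness_remove_unit_trailing_period_py) ∧
  D_remove_unit_trailing_period_py (pvDiffWitness_remove_unit_trailing_period_py) ∧
  remove_unit_trailing_period_py (pvDiffWitness_remove_unit_trailing_period_py) = pvDiffWitnessOut_remove_unit_trailing_period_py.1 ∧
  remove_unit_trailing_period_py_alt (pvDiffWitness_remove_unit_trailing_period_py) = pvDiffWitnessOut_remove_unit_trailing_period_py.2 ∧
  pvDiffWitnessOut_remove_unit_trailing_period_py.1 ≠ pvDiffWitnessOut_remove_unit_trailing_period_py.2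

def Claim_exact_remove_unit_trailing_period_py : Prop :=
  ∀ (sentence : String), Dom_remove_unit_trailing_period_py sentence →
    D_remove_unit_trailing_period_py sentence →
    remove_unit_trailing_period_py sentence ≠ remove_unit_trailing_period_py_alt sentence

-- ===== LEMMAS AND PROOFS =====

-- the unit with its period removed, as A computes it
def nopOf (p : List Char) : List Char := PySem.Chars.replace p ['.'] []

-- Python str.replace for a nonempty pattern, as plain recursion (proof model of A's passes)
def repS (old new : List Char) (l : List Char) : List Char :=
  match l with
  | [] => []
  | c :: t =>
    if old.isPrefixOf (c :: t) then new ++ repS old new ((c :: t).drop (max old.length 1))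
    else c :: repS old new t
termination_by l.length
decreasing_by
  all_goals simp

def stepR (s p : List Char) : List Char := repS p (nopOf p) s

def passesC (cs : List Char) : List Char :=
  pvUnitsB.foldl (fun s p => PySem.Chars.replace s p (PySem.Chars.replace p ['.'] [])) cs

def passesR (cs : List Char) : List Char := pvUnitsB.foldl stepR cs

def TC : List (List Char) :=
  ["tsp.s.".toList, "tbsp.s.".toList, "lb.s.".toList, "Tsp.s.".toList, "Tbsp.s.".toList,
   "Lb.s.".toList]

def NoTrig (cs : List Char) : Prop := ∀ tr ∈ TC, ¬ tr <:+: cs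

theorem repS_nil (old new : List Char) : repS old new [] = [] := by simp [repS]

theorem go_eq_repS (old new : List Char) (hold : old ≠ []) :
    ∀ (fuel : Nat) (l acc : List Char), l.length ≤ fuel →
      PySem.Chars.replace.go old new fuel l acc = acc.reverse ++ repS old new l := by
  intro fuel
  induction fuel with
  | zero =>
    intro l acc h
    have hl : l = [] := by cases l <;> simp_all
    subst hl
    simp [PySem.Chars.replace.go, repS_nil]
  | succ f ih =>
    intro l acc h
    cases l with
    | nil => simp [PySem.Chars.replace.go, repS_nil]
    | cons c t =>
      have hlen : 1 ≤ old.length := by cases old <;> simp_all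
      by_cases hp : old.isPrefixOf (c :: t)
      · have hrec : ((c :: t).drop old.length).length ≤ f := by
          simp only [List.length_drop, List.length_cons] at *
          omega
        rw [show PySem.Chars.replace.go old new (f+1) (c::t) acc =
              PySem.Chars.replace.go old new f ((c::t).drop old.length) (new.reverse ++ acc) from by
            simp [PySem.Chars.replace.go, hp]]
        rw [ih _ _ hrec]
        rw [show repS old new (c::t) = new ++ repS old new ((c::t).drop (max old.length 1)) from by
            rw [repS]; simp [hp]]
        simp [Nat.max_eq_left hlen]
      · rw [show PySem.Chars.replace.go old new (f+1) (c::t) acc =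
              PySem.Chars.replace.go old new f t (c :: acc) from by
            simp [PySem.Chars.replace.go, hp]]
        rw [ih t (c :: acc) (by simp only [List.length_cons] at h; omega)]
        rw [show repS old new (c::t) = c :: repS old new t from by rw [repS]; simp [hp]]
        simp

theorem replace_eq_repS (old new l : List Char) (hold : old ≠ []) :
    PySem.Chars.replace l old new = repS old new l := by
  have he : old.isEmpty = false := by cases old <;> simp_all
  rw [PySem.Chars.replace, he]
  simpa using go_eq_repS old new hold l.length l [] le_rfl

theorem prefix_append_cases {a x y : List Char} (h : a <+: x ++ y) : x <+: a ∨ a <+: x :=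
  List.prefix_or_prefix_of_prefix (List.prefix_append x y) h

theorem repS_append (old new : List Char) :
    ∀ (x : List Char) (y : List Char), (∀ i < x.length, ¬ old <+: (x.drop i ++ y)) →
      repS old new (x ++ y) = x ++ repS old new y := by
  intro x
  induction x with
  | nil => intro y _; rfl
  | cons c x' ih =>
    intro y h
    have h0 : ¬ old <+: (c :: (x' ++ y)) := by
      have := h 0 (by simp); simpa using this
    have hb : old.isPrefixOf (c :: (x' ++ y)) = false := by
      rw [Bool.eq_false_iff]; intro hc
      exact h0 (List.isPrefixOf_iff_prefix.mp hc)
    rw [List.cons_append, repS, hb]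
    simp only [Bool.false_eq_true, if_false]
    rw [ih y (fun i hi => by
      have := h (i+1) (by simp only [List.length_cons]; omega)
      simpa using this)]
    simp

theorem repS_front (old new t : List Char) (h : old ≠ []) :
    repS old new (old ++ t) = new ++ repS old new t := by
  have hlen : 1 ≤ old.length := by cases old <;> simp_all
  cases old with
  | nil => exact absurd rfl h
  | cons o os =>
    have hb : (o :: os).isPrefixOf (o :: (os ++ t)) = true := by
      rw [List.isPrefixOf_iff_prefix]
      exact (List.prefix_append (o :: os) t).trans (by rw [List.cons_append])
    rw [List.cons_append, repS, hb]
    simp only [if_true]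
    congr 1
    rw [Nat.max_eq_left (by simp)]
    rw [← List.cons_append, List.drop_left]

theorem repS_prefix_rev (old new : List Char) :
    ∀ (n : Nat) (l σ : List Char), l.length ≤ n →
      (∀ k < σ.length, ¬ (σ.drop k <+: new) ∧ ¬ (new <+: σ.drop k)) →
      σ <+: repS old new l → σ <+: l := by
  intro n
  induction n with
  | zero =>
    intro l σ hl _ hp
    have : l = [] := by cases l <;> simp_all
    subst this
    rw [repS_nil] at hp
    simp [List.prefix_nil.mp hp]
  | succ m ih =>
    intro l σ hl hσ hp
    cases l with
    | nil =>
      rw [repS_nil] at hp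
      simp [List.prefix_nil.mp hp]
    | cons c t =>
      by_cases hm : old.isPrefixOf (c :: t)
      · rw [repS] at hp
        simp only [hm, if_true] at hp
        cases σ with
        | nil => exact List.nil_prefix
        | cons s0 σ' =>
          rcases prefix_append_cases hp with h1 | h1
          · exact absurd h1 (hσ 0 (by simp)).2
          · exact absurd h1 (hσ 0 (by simp)).1
      · rw [repS] at hp
        simp only [hm, Bool.false_eq_true, if_false] at hp
        cases σ with
        | nil => exact List.nil_prefix
        | cons s0 σ' =>
          rw [List.cons_prefix_cons] at hp
          obtain ⟨rfl, hp'⟩ := hp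
          have hrec := ih t σ' (by simp only [List.length_cons] at hl; omega)
            (fun k hk => by
              have := hσ (k+1) (by simp only [List.length_cons]; omega)
              simpa using this) hp'
          exact List.cons_prefix_cons.mpr ⟨rfl, hrec⟩

theorem fold_prefix_rev (σ : List Char) :
    ∀ (L : List (List Char)),
      (∀ q ∈ L, ∀ k < σ.length, ¬ (σ.drop k <+: nopOf q) ∧ ¬ (nopOf q <+: σ.drop k)) →
      ∀ s, σ <+: L.foldl stepR s → σ <+: s := by
  intro L
  induction L with
  | nil => intro _ s h; simpa using h
  | cons q L' ih =>
    intro hσ s h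
    have h' := ih (fun q' hq' => hσ q' (by simp [hq'])) (stepR s q)
      (by simpa [List.foldl_cons] using h)
    exact repS_prefix_rev q (nopOf q) s.length s σ le_rfl (hσ q (by simp)) h'

theorem fold_append (x : List Char) (P : List Char → Prop) :
    ∀ (L : List (List Char)),
      (∀ q ∈ L, ∀ s, P s → P (stepR s q)) →
      (∀ q ∈ L, ∀ s, P s → stepR (x ++ s) q = x ++ stepR s q) →
      ∀ t, P t → L.foldl stepR (x ++ t) = x ++ L.foldl stepR t := by
  intro L
  induction L with
  | nil => intro _ _ t _; rfl
  | cons q L' ih =>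
    intro hpres hx t hP
    simp only [List.foldl_cons]
    rw [hx q (by simp) t hP]
    exact ih (fun a ha => hpres a (by simp [ha])) (fun a ha => hx a (by simp [ha]))
      (stepR t q) (hpres q (by simp) t hP)

-- decidable facts about the 18 concrete unit strings
theorem F_nonempty : ∀ p ∈ pvUnitsB, p ≠ [] := by decide
theorem F_nop : ∀ p ∈ pvUnitsB, nopOf p = p.dropLast := by decide

-- a pass for a unit q listed BEFORE p never touches an occurrence of the block p
theorem F_before : List.Pairwise
    (fun q p => ∀ i < p.length, ¬ (p.drop i <+: q) ∧ ¬ (q <+: p.drop i)) pvUnitsB := by decide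

-- a pass for a unit q listed AFTER p overlaps the replaced block (nopOf p) only in the
-- cascade shape q = nopOf p ++ "s."
theorem F_after : List.Pairwise
    (fun p q => ∀ i < (nopOf p).length,
      ((nopOf p).drop i <+: q ∨ q <+: (nopOf p).drop i) →
        (i = 0 ∧ q = nopOf p ++ ['s', '.'])) pvUnitsB := by decide

theorem F_trig : List.Pairwise
    (fun p q => q = nopOf p ++ ['s', '.'] → (p ++ ['s', '.']) ∈ TC) pvUnitsB := by decide

theorem F_sdot : ∀ q ∈ pvUnitsB, ∀ k < 2,
    ¬ ((['s', '.'].drop k) <+: nopOf q) ∧ ¬ (nopOf q <+: (['s', '.'].drop k)) := by decide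

theorem F_dropone : ∀ q' ∈ pvUnitsB, ∀ q ∈ pvUnitsB, ∀ k < (q'.drop 1).length,
    ¬ ((q'.drop 1).drop k <+: nopOf q) ∧ ¬ (nopOf q <+: (q'.drop 1).drop k) := by decide

theorem NoTrig_mono {x y : List Char} (h : y <:+: x) (hx : NoTrig x) : NoTrig y :=
  fun tr htr hinf => hx tr htr (hinf.trans h)

theorem foldl_stepR_nil : ∀ L : List (List Char), L.foldl stepR [] = [] := by
  intro L
  induction L with
  | nil => rfl
  | cons q L ih => simp [List.foldl_cons, stepR, repS_nil, ih]

theorem passes_nil : passesR [] = [] := foldl_stepR_nil pvUnitsB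

theorem passes_block (u : List Char) (hu : u ∈ pvUnitsB) (t : List Char)
    (hcasc : (u ++ ['s','.']) ∈ TC → ¬ ((['s','.'] : List Char) <+: t)) :
    passesR (u ++ t) = nopOf u ++ passesR t := by
  obtain ⟨Pre, Post, hsplit⟩ := List.append_of_mem hu
  have hne : u ≠ [] := F_nonempty u hu
  have hPreSub : ∀ q ∈ Pre, q ∈ pvUnitsB := fun q hq => by rw [hsplit]; simp [hq]
  have hPostSub : ∀ q ∈ Post, q ∈ pvUnitsB := fun q hq => by rw [hsplit]; simp [hq]
  have hbefore : ∀ q ∈ Pre, ∀ i < u.length, ¬ (u.drop i <+: q) ∧ ¬ (q <+: u.drop i) := by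
    have hpw := F_before
    rw [hsplit, List.pairwise_append] at hpw
    exact fun q hq => hpw.2.2 q hq u (by simp)
  have hafter : ∀ q ∈ Post, ∀ i < (nopOf u).length,
      ((nopOf u).drop i <+: q ∨ q <+: (nopOf u).drop i) → (i = 0 ∧ q = nopOf u ++ ['s','.']) := by
    have hpw := F_after
    rw [hsplit, List.pairwise_append] at hpw
    exact fun q hq => (List.pairwise_cons.mp hpw.2.1).1 q hq
  have htrigf : ∀ q ∈ Post, q = nopOf u ++ ['s','.'] → (u ++ ['s','.']) ∈ TC := by
    have hpw := F_trig
    rw [hsplit, List.pairwise_append] at hpw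
    exact fun q hq => (List.pairwise_cons.mp hpw.2.1).1 q hq
  -- phase 1: the passes before u leave the block u intact
  have e1 : Pre.foldl stepR (u ++ t) = u ++ Pre.foldl stepR t := by
    apply fold_append u (fun _ => True) Pre (by simp)
      (fun q hq s _ => by
        show repS q (nopOf q) (u ++ s) = u ++ repS q (nopOf q) s
        apply repS_append
        intro i hi hcon
        rcases prefix_append_cases hcon with h1 | h1
        · exact (hbefore q hq i hi).1 h1
        · exact (hbefore q hq i hi).2 h1) t trivial
  -- phase 2: the pass for u strips the leading u
  have e2 : stepR (u ++ Pre.foldl stepR t) u = nopOf u ++ stepR (Pre.foldl stepR t) u :=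
    repS_front u (nopOf u) _ hne
  -- phase 3: the passes after u leave the block (nopOf u) intact
  set t2 := stepR (Pre.foldl stepR t) u with ht2
  have hsdot2 : ∀ k, k < (['s','.'] : List Char).length → k < 2 := by
    intro k hk; simpa using hk
  have e3 : Post.foldl stepR (nopOf u ++ t2) = nopOf u ++ Post.foldl stepR t2 := by
    by_cases hTC : (u ++ ['s','.']) ∈ TC
    · -- u has a cascade successor; NoTrig rules the cascade tail "s." out of t2
      have hQt2 : ¬ ((['s','.'] : List Char) <+: t2) := by
        intro hst
        have h1 : (['s','.'] : List Char) <+: Pre.foldl stepR t :=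
          repS_prefix_rev u (nopOf u) _ _ _ le_rfl
            (fun k hk => F_sdot u hu k (hsdot2 k hk)) hst
        have h2 : (['s','.'] : List Char) <+: t :=
          fold_prefix_rev _ Pre (fun q hq k hk => F_sdot q (hPreSub q hq) k (hsdot2 k hk)) t h1
        exact hcasc hTC h2
      apply fold_append (nopOf u) (fun s => ¬ ((['s','.'] : List Char) <+: s)) Post
        (fun q hq s hs hcon =>
          hs (repS_prefix_rev q (nopOf q) _ _ _ le_rfl
            (fun k hk => F_sdot q (hPostSub q hq) k (hsdot2 k hk)) hcon))
        (fun q hq s hs => by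
          show repS q (nopOf q) (nopOf u ++ s) = nopOf u ++ repS q (nopOf q) s
          apply repS_append
          intro i hi hcon
          obtain ⟨hi0, hq'⟩ := hafter q hq i hi (prefix_append_cases hcon)
          subst hi0
          rw [List.drop_zero] at hcon
          rw [hq'] at hcon
          exact hs ((List.prefix_append_right_inj (nopOf u)).mp hcon))
        t2 hQt2
    · -- u has no cascade successor among the later passes: no overlap at all
      apply fold_append (nopOf u) (fun _ => True) Post (by simp)
        (fun q hq s _ => by
          show repS q (nopOf q) (nopOf u ++ s) = nopOf u ++ repS q (nopOf q) s
          apply repS_append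
          intro i hi hcon
          obtain ⟨hi0, hq'⟩ := hafter q hq i hi (prefix_append_cases hcon)
          exact hTC (htrigf q hq hq'))
        t2 trivial
  -- assemble
  rw [passesR, passesR, hsplit, List.foldl_append, List.foldl_append, List.foldl_cons,
    List.foldl_cons, e1, e2, ← ht2, e3]

theorem passes_cons (c : Char) (t : List Char)
    (hnone : ∀ q ∈ pvUnitsB, ¬ q <+: (c :: t)) : passesR (c :: t) = c :: passesR t := by
  have hfa := fold_append [c] (fun s => ∀ q ∈ pvUnitsB, ¬ q <+: (c :: s)) pvUnitsB
    (fun q hq s hs q' hq' hcon => by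
      cases q' with
      | nil => exact (F_nonempty [] hq') rfl
      | cons q0 qs =>
        rw [List.cons_prefix_cons] at hcon
        obtain ⟨hq0, hqs⟩ := hcon
        have hrec := repS_prefix_rev q (nopOf q) s.length s qs le_rfl
          (fun k hk => F_dropone (q0 :: qs) hq' q hq k (by simpa using hk)) hqs
        exact hs (q0 :: qs) hq' (List.cons_prefix_cons.mpr ⟨hq0, hrec⟩))
    (fun q hq s hs => by
      show repS q (nopOf q) ([c] ++ s) = [c] ++ repS q (nopOf q) s
      apply repS_append
      intro i hi hcon
      have hi0 : i = 0 := by simpa using hi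
      subst hi0
      exact hs q hq (by simpa using hcon))
    t hnone
  simpa [passesR] using hfa

theorem main_lemma : ∀ (n : Nat) (cs : List Char) (fuel : Nat),
    cs.length ≤ n → cs.length ≤ fuel → NoTrig cs →
    passesR cs = pvScan fuel pvUnitsB cs := by
  intro n
  induction n with
  | zero =>
    intro cs fuel h1 _ _
    have : cs = [] := by cases cs <;> simp_all
    subst this
    cases fuel <;> simp [pvScan, passes_nil]
  | succ m ih =>
    intro cs fuel h1 h2 h3
    cases cs with
    | nil => cases fuel <;> simp [pvScan, passes_nil]
    | cons c t =>
      cases fuel with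
      | zero => simp at h2
      | succ f =>
        cases hfm : pvUnitsB.find? (fun u => u.isPrefixOf (c :: t)) with
        | some u =>
          have hmem : u ∈ pvUnitsB := List.mem_of_find?_eq_some hfm
          have hpreb := List.find?_some hfm
          have hpre : u <+: (c :: t) := List.isPrefixOf_iff_prefix.mp (by simpa using hpreb)
          obtain ⟨rest, hrest⟩ := hpre
          have hne : u ≠ [] := F_nonempty u hmem
          have hul : 1 ≤ u.length := by cases u <;> simp_all
          have e : passesR (c :: t) = nopOf u ++ passesR rest := by
            rw [← hrest]
            exact passes_block u hmem rest (fun hTC hs =>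
              h3 _ hTC (by
                rw [← hrest]
                exact ((List.prefix_append_right_inj u).mpr hs).isInfix))
          have edrop : (c :: t).drop u.length = rest := by
            rw [← hrest]; simp
          rw [show pvScan (f+1) pvUnitsB (c :: t) =
                u.dropLast ++ pvScan f pvUnitsB ((c :: t).drop u.length) from by
              rw [pvScan, hfm]]
          rw [e, F_nop u hmem, edrop]
          congr 1
          have hlrest : rest.length ≤ m := by
            have : (c :: t).length = u.length + rest.length := by rw [← hrest]; simp
            simp only [List.length_cons] at h1 this
            omega
          have hfrest : rest.length ≤ f := by
            have : (c :: t).length = u.length + rest.length := by rw [← hrest]; simp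
            simp only [List.length_cons] at h2 this
            omega
          exact ih rest f hlrest hfrest
            (NoTrig_mono (List.IsSuffix.isInfix ⟨u, hrest⟩) h3)
        | none =>
          have hnone : ∀ q ∈ pvUnitsB, ¬ q <+: (c :: t) := by
            intro q hq hcon
            have hq2 := List.find?_eq_none.mp hfm q hq
            rw [List.isPrefixOf_iff_prefix] at hq2
            exact hq2 hcon
          have e : passesR (c :: t) = c :: passesR t := passes_cons c t hnone
          rw [e, show pvScan (f+1) pvUnitsB (c :: t) = c :: pvScan f pvUnitsB t from by
              rw [pvScan, hfm]]
          congr 1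
          exact ih t f (by simp only [List.length_cons] at h1; omega)
            (by simp only [List.length_cons] at h2; omega)
            (NoTrig_mono (List.IsSuffix.isInfix (List.suffix_cons c t)) h3)

theorem strfold : ∀ (L : List String) (s : String),
    L.foldl (fun s u => PySem.Str.replace s u (PySem.Str.replace u "." "")) s =
    String.ofList ((L.map String.toList).foldl
      (fun cs p => PySem.Chars.replace cs p (PySem.Chars.replace p ['.'] [])) s.toList) := by
  intro L
  induction L with
  | nil => intro s; simp
  | cons u L' ih =>
    intro s
    simp only [List.foldl_cons, List.map_cons]
    rw [ih]
    congr 1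
    rw [PySem.Str.toList_replace]
    rw [PySem.Str.toList_replace]
    rfl

theorem unitsA_eq :
    ((["tsp.", "tsps.", "tbsp.", "tbsps.", "tbs.", "tb.", "lb.", "lbs.", "oz."] ++
      (["tsp.", "tsps.", "tbsp.", "tbsps.", "tbs.", "tb.", "lb.", "lbs.", "oz."] : List String).map
        pyCapitalize).map String.toList) = pvUnitsB := by decide

theorem portA_eq (s : String) :
    remove_unit_trailing_period_py s = String.ofList (passesC s.toList) := by
  have hA : remove_unit_trailing_period_py s =
      ((["tsp.", "tsps.", "tbsp.", "tbsps.", "tbs.", "tb.", "lb.", "lbs.", "oz."] ++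
        (["tsp.", "tsps.", "tbsp.", "tbsps.", "tbs.", "tb.", "lb.", "lbs.", "oz."] : List String).map
          pyCapitalize)).foldl
        (fun s u => PySem.Str.replace s u (PySem.Str.replace u "." "")) s := rfl
  rw [hA, strfold, unitsA_eq]
  rfl

theorem passesC_eq_passesR (cs : List Char) : passesC cs = passesR cs := by
  apply List.foldl_ext
  intro b a ha
  exact replace_eq_repS a (PySem.Chars.replace a ['.'] []) b (F_nonempty a ha)

theorem noTrig_of_not_D (s : String) (h : ¬ D_remove_unit_trailing_period_py s) :
    NoTrig s.toList := by
  rw [D_remove_unit_trailing_period_py] at h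
  simp only [not_or] at h
  obtain ⟨h1, h2, h3, h4, h5, h6⟩ := h
  intro tr htr hinf
  simp only [TC, List.mem_cons, List.not_mem_nil, or_false] at htr
  rcases htr with rfl | rfl | rfl | rfl | rfl | rfl
  · exact h1 ((PySem.Str.isIn_iff_infix _ s).mpr hinf)
  · exact h2 ((PySem.Str.isIn_iff_infix _ s).mpr hinf)
  · exact h3 ((PySem.Str.isIn_iff_infix _ s).mpr hinf)
  · exact h4 ((PySem.Str.isIn_iff_infix _ s).mpr hinf)
  · exact h5 ((PySem.Str.isIn_iff_infix _ s).mpr hinf)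
  · exact h6 ((PySem.Str.isIn_iff_infix _ s).mpr hinf)

-- ===== tightness: inside D_ the outputs always differ (A deletes strictly more) =====

theorem F_nodup : pvUnitsB.Nodup := by decide
theorem F_headnot : ∀ q ∈ pvUnitsB, q.take 1 ≠ ['s'] ∧ q.take 1 ≠ ['.'] ∧ q ≠ [] := by decide
theorem F_casclater : List.Pairwise
    (fun a b => (b ++ ['s','.']) ∈ TC → a ≠ nopOf b ++ ['s','.']) pvUnitsB := by decide
theorem F_badq : ∀ u ∈ pvUnitsB, (u ++ ['s','.']) ∈ TC → (nopOf u ++ ['s','.']) ∈ pvUnitsB := by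
  decide
theorem F_qstar_ne : ∀ u ∈ pvUnitsB, ¬ (nopOf u ++ ['s','.'] = u) := by decide
theorem F_noc2 : ∀ p ∈ pvUnitsB, ∀ q ∈ pvUnitsB,
    q ≠ nopOf (nopOf p ++ ['s','.']) ++ ['s','.'] := by decide
theorem F_trigfront : ∀ u ∈ pvUnitsB, ∀ tr ∈ TC,
    (u <+: tr ∨ tr <+: u) → tr = u ++ ['s','.'] := by decide
theorem F_trigmid : ∀ u ∈ pvUnitsB, ∀ tr ∈ TC, ∀ i < u.length, 0 < i →
    ¬ (u.drop i <+: tr) ∧ ¬ (tr <+: u.drop i) := by decide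
theorem F_trighead : ∀ tr ∈ TC, ∃ p ∈ pvUnitsB, p <+: tr := by decide
theorem F_TCne : ∀ tr ∈ TC, tr ≠ [] := by decide

theorem not_prefix_head (q : List Char) (hq : q ∈ pvUnitsB) (c : Char)
    (hc : c = 's' ∨ c = '.') (z : List Char) : ¬ q <+: c :: z := by
  have h3 := F_headnot q hq
  cases q with
  | nil => exact absurd rfl h3.2.2
  | cons q0 qs =>
    intro hcon
    rw [List.cons_prefix_cons] at hcon
    obtain ⟨h0, -⟩ := hcon
    rcases hc with rfl | rfl
    · exact h3.1 (by simp [h0])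
    · exact h3.2.1 (by simp [h0])

theorem step_block_sdot (q : List Char) (hq : q ∈ pvUnitsB) (z : List Char) (new : List Char) :
    repS q new ('s' :: '.' :: z) = 's' :: '.' :: repS q new z := by
  have h := repS_append q new ['s','.'] z (fun i hi => by
    have : i = 0 ∨ i = 1 := by simp at hi; omega
    rcases this with rfl | rfl
    · simpa using not_prefix_head q hq 's' (Or.inl rfl) ('.' :: z)
    · simpa using not_prefix_head q hq '.' (Or.inr rfl) z)
  simpa using h

theorem cascade_block (u : List Char) (hu : u ∈ pvUnitsB) (hTCu : (u ++ ['s','.']) ∈ TC)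
    (y : List Char) :
    passesR (u ++ 's' :: '.' :: y) = nopOf u ++ 's' :: passesR y := by
  obtain ⟨Pre, Post, hsplit⟩ := List.append_of_mem hu
  have hne : u ≠ [] := F_nonempty u hu
  have hPreSub : ∀ q ∈ Pre, q ∈ pvUnitsB := fun q hq => by rw [hsplit]; simp [hq]
  have hPostSub : ∀ q ∈ Post, q ∈ pvUnitsB := fun q hq => by rw [hsplit]; simp [hq]
  have hbefore : ∀ q ∈ Pre, ∀ i < u.length, ¬ (u.drop i <+: q) ∧ ¬ (q <+: u.drop i) := by
    have hpw := F_before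
    rw [hsplit, List.pairwise_append] at hpw
    exact fun q hq => hpw.2.2 q hq u (by simp)
  have hafter : ∀ q ∈ Post, ∀ i < (nopOf u).length,
      ((nopOf u).drop i <+: q ∨ q <+: (nopOf u).drop i) → (i = 0 ∧ q = nopOf u ++ ['s','.']) := by
    have hpw := F_after
    rw [hsplit, List.pairwise_append] at hpw
    exact fun q hq => (List.pairwise_cons.mp hpw.2.1).1 q hq
  have hqpat : (nopOf u ++ ['s','.']) ∈ pvUnitsB := F_badq u hu hTCu
  have hqPost : (nopOf u ++ ['s','.']) ∈ Post := by
    have hmem2 := hqpat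
    rw [hsplit] at hmem2
    rcases List.mem_append.mp hmem2 with hPre | huPost
    · exfalso
      have hpw := F_casclater
      rw [hsplit, List.pairwise_append] at hpw
      exact (hpw.2.2 _ hPre u (by simp)) hTCu rfl
    · rcases List.mem_cons.mp huPost with heq | hPost2
      · exact absurd heq (F_qstar_ne u hu)
      · exact hPost2
  obtain ⟨P1, P2, hPostSplit⟩ := List.append_of_mem hqPost
  have hP1Sub : ∀ q ∈ P1, q ∈ pvUnitsB := fun q hq => hPostSub q (by rw [hPostSplit]; simp [hq])
  have hP2Sub : ∀ q ∈ P2, q ∈ pvUnitsB := fun q hq => hPostSub q (by rw [hPostSplit]; simp [hq])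
  have hP1ne : ∀ q ∈ P1, q ≠ nopOf u ++ ['s','.'] := by
    have hnd := F_nodup
    rw [hsplit] at hnd
    have hnd2 : Post.Nodup := (List.nodup_cons.mp (List.nodup_append.mp hnd).2.1).2
    rw [hPostSplit] at hnd2
    have hdisj := (List.nodup_append.mp hnd2).2.2
    exact fun q hq heq => hdisj q hq (nopOf u ++ ['s','.']) (by simp) heq
  have hafter2 : ∀ q ∈ P2, ∀ i < (nopOf (nopOf u ++ ['s','.'])).length,
      ((nopOf (nopOf u ++ ['s','.'])).drop i <+: q ∨ q <+: (nopOf (nopOf u ++ ['s','.'])).drop i) →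
        q = nopOf (nopOf u ++ ['s','.']) ++ ['s','.'] := by
    have hpw := F_after
    have hsplit2 : pvUnitsB = (Pre ++ u :: P1) ++ (nopOf u ++ ['s','.']) :: P2 := by
      rw [hsplit, hPostSplit]; simp
    rw [hsplit2, List.pairwise_append] at hpw
    exact fun q hq i hi hc => ((List.pairwise_cons.mp hpw.2.1).1 q hq i hi hc).2
  -- block-preservation equations
  have hublock : ∀ q ∈ Pre, ∀ s, stepR (u ++ s) q = u ++ stepR s q := fun q hq s => by
    show repS q (nopOf q) (u ++ s) = u ++ repS q (nopOf q) s
    apply repS_append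
    intro i hi hcon
    rcases prefix_append_cases hcon with h1 | h1
    · exact (hbefore q hq i hi).1 h1
    · exact (hbefore q hq i hi).2 h1
  have hnblock : ∀ q ∈ P1, ∀ s, stepR (nopOf u ++ s) q = nopOf u ++ stepR s q := fun q hq s => by
    show repS q (nopOf q) (nopOf u ++ s) = nopOf u ++ repS q (nopOf q) s
    apply repS_append
    intro i hi hcon
    exact hP1ne q hq (hafter q (by rw [hPostSplit]; simp [hq]) i hi (prefix_append_cases hcon)).2
  have hq2block : ∀ q ∈ P2, ∀ s,
      stepR (nopOf (nopOf u ++ ['s','.']) ++ s) q =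
        nopOf (nopOf u ++ ['s','.']) ++ stepR s q := fun q hq s => by
    show repS q (nopOf q) _ = _
    apply repS_append
    intro i hi hcon
    exact F_noc2 u hu q (hP2Sub q hq) (hafter2 q hq i hi (prefix_append_cases hcon))
  -- composite phase equations
  have E1 : ∀ z, Pre.foldl stepR (u ++ 's' :: '.' :: z) =
      u ++ 's' :: '.' :: Pre.foldl stepR z := by
    intro z
    have a1 := fold_append u (fun _ => True) Pre (by simp)
      (fun q hq s _ => hublock q hq s) ('s' :: '.' :: z) trivial
    have a2 := fold_append ['s','.'] (fun _ => True) Pre (by simp)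
      (fun q hq s _ => step_block_sdot q (hPreSub q hq) s (nopOf q)) z trivial
    have a2' : Pre.foldl stepR ('s' :: '.' :: z) = 's' :: '.' :: Pre.foldl stepR z := a2
    rw [a1, a2']
  have E3 : ∀ z, P1.foldl stepR (nopOf u ++ 's' :: '.' :: z) =
      nopOf u ++ 's' :: '.' :: P1.foldl stepR z := by
    intro z
    have a1 := fold_append (nopOf u) (fun _ => True) P1 (by simp)
      (fun q hq s _ => hnblock q hq s) ('s' :: '.' :: z) trivial
    have a2 := fold_append ['s','.'] (fun _ => True) P1 (by simp)
      (fun q hq s _ => step_block_sdot q (hP1Sub q hq) s (nopOf q)) z trivial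
    have a2' : P1.foldl stepR ('s' :: '.' :: z) = 's' :: '.' :: P1.foldl stepR z := a2
    rw [a1, a2']
  have E4 : ∀ z, P2.foldl stepR (nopOf (nopOf u ++ ['s','.']) ++ z) =
      nopOf (nopOf u ++ ['s','.']) ++ P2.foldl stepR z := fun z =>
    fold_append (nopOf (nopOf u ++ ['s','.'])) (fun _ => True) P2 (by simp)
      (fun q hq s _ => hq2block q hq s) z trivial
  have e2 : ∀ z, stepR (u ++ 's' :: '.' :: z) u = nopOf u ++ 's' :: '.' :: stepR z u := by
    intro z
    show repS u (nopOf u) (u ++ ('s' :: '.' :: z)) = _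
    rw [repS_front u (nopOf u) _ hne, step_block_sdot u hu z (nopOf u)]
    rfl
  have e3b : ∀ z, stepR (nopOf u ++ 's' :: '.' :: z) (nopOf u ++ ['s','.']) =
      nopOf (nopOf u ++ ['s','.']) ++ stepR z (nopOf u ++ ['s','.']) := by
    intro z
    have hassoc : nopOf u ++ 's' :: '.' :: z = (nopOf u ++ ['s','.']) ++ z := by simp
    rw [hassoc]
    exact repS_front _ _ _ (F_nonempty _ hqpat)
  have hnq : nopOf (nopOf u ++ ['s','.']) = nopOf u ++ ['s'] := by
    rw [F_nop _ hqpat]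
    have h : nopOf u ++ ['s','.'] = (nopOf u ++ ['s']) ++ ['.'] := by simp
    rw [h, List.dropLast_concat]
  have hdecomp : ∀ z, passesR z =
      P2.foldl stepR (stepR (P1.foldl stepR (stepR (Pre.foldl stepR z) u)) (nopOf u ++ ['s','.'])) := by
    intro z
    rw [passesR, hsplit, hPostSplit]
    simp [List.foldl_append, List.foldl_cons]
  rw [hdecomp (u ++ 's' :: '.' :: y), hdecomp y, E1, e2, E3, e3b, E4, hnq]
  simp

theorem find?_none_head (c : Char) (hc : c = 's' ∨ c = '.') (z : List Char) :
    pvUnitsB.find? (fun q => q.isPrefixOf (c :: z)) = none := by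
  apply List.find?_eq_none.mpr
  intro q hq hcon
  rw [List.isPrefixOf_iff_prefix] at hcon
  exact not_prefix_head q hq c hc z hcon

theorem scan_sdot (f : Nat) (y : List Char) (h : y.length + 2 ≤ f) :
    ∃ f2, y.length ≤ f2 ∧
      pvScan f pvUnitsB ('s' :: '.' :: y) = 's' :: '.' :: pvScan f2 pvUnitsB y := by
  cases f with
  | zero => omega
  | succ f1 =>
    cases f1 with
    | zero => omega
    | succ f2 =>
      refine ⟨f2, by omega, ?_⟩
      rw [pvScan, find?_none_head 's' (Or.inl rfl) ('.' :: y)]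
      rw [pvScan, find?_none_head '.' (Or.inr rfl) y]

theorem infix_drop {tr cs : List Char} (h : tr <:+: cs) : ∃ i, tr <+: cs.drop i := by
  obtain ⟨s, t, hst⟩ := h
  refine ⟨s.length, ?_⟩
  rw [← hst, List.append_assoc, List.drop_left]
  exact List.prefix_append tr t

theorem drop_infix {tr cs : List Char} (i : Nat) (h : tr <+: cs.drop i) : tr <:+: cs :=
  h.isInfix.trans (List.drop_suffix i cs).isInfix

theorem lenLE : ∀ (n : Nat) (cs : List Char) (fuel : Nat),
    cs.length ≤ n → cs.length ≤ fuel →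
    (passesR cs).length ≤ (pvScan fuel pvUnitsB cs).length := by
  intro n
  induction n with
  | zero =>
    intro cs fuel h1 _
    have : cs = [] := by cases cs <;> simp_all
    subst this
    cases fuel <;> simp [pvScan, passes_nil]
  | succ m ih =>
    intro cs fuel h1 h2
    cases cs with
    | nil => cases fuel <;> simp [pvScan, passes_nil]
    | cons c t =>
      cases fuel with
      | zero => simp at h2
      | succ f =>
        cases hfm : pvUnitsB.find? (fun u => u.isPrefixOf (c :: t)) with
        | none =>
          have hnone : ∀ q ∈ pvUnitsB, ¬ q <+: (c :: t) := by
            intro q hq hcon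
            have hq2 := List.find?_eq_none.mp hfm q hq
            rw [List.isPrefixOf_iff_prefix] at hq2
            exact hq2 hcon
          rw [passes_cons c t hnone,
            show pvScan (f+1) pvUnitsB (c :: t) = c :: pvScan f pvUnitsB t from by
              rw [pvScan, hfm]]
          simp only [List.length_cons]
          have := ih t f (by simp only [List.length_cons] at h1; omega)
            (by simp only [List.length_cons] at h2; omega)
          omega
        | some u =>
          have hmem : u ∈ pvUnitsB := List.mem_of_find?_eq_some hfm
          have hpreb := List.find?_some hfm
          have hpre : u <+: (c :: t) := List.isPrefixOf_iff_prefix.mp (by simpa using hpreb)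
          obtain ⟨rest, hrest⟩ := hpre
          have hne : u ≠ [] := F_nonempty u hmem
          have hul : 1 ≤ u.length := by cases u <;> simp_all
          have hlen_cs : (c :: t).length = u.length + rest.length := by rw [← hrest]; simp
          have edrop : (c :: t).drop u.length = rest := by rw [← hrest]; simp
          rw [show pvScan (f+1) pvUnitsB (c :: t) =
                u.dropLast ++ pvScan f pvUnitsB ((c :: t).drop u.length) from by
              rw [pvScan, hfm], edrop]
          by_cases hc2 : ((u ++ ['s','.']) ∈ TC ∧ (['s','.'] : List Char) <+: rest)
          · obtain ⟨hTCu, hsp⟩ := hc2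
            obtain ⟨y, hy⟩ := hsp
            subst hy
            have hA : passesR (c :: t) = u.dropLast ++ 's' :: passesR y := by
              rw [← hrest, ← F_nop u hmem]
              exact cascade_block u hmem hTCu y
            have hflen : y.length + 2 ≤ f := by
              simp only [List.length_cons] at h2
              simp only [List.length_append, List.length_cons, List.length_nil] at hlen_cs
              omega
            obtain ⟨f2, hf2, hBs⟩ := scan_sdot f y hflen
            rw [hA, show pvScan f pvUnitsB (['s','.'] ++ y) =
                  's' :: '.' :: pvScan f2 pvUnitsB y from hBs]
            simp only [List.length_append, List.length_cons]
            have := ih y f2 (by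
              simp only [List.length_cons] at h1
              simp only [List.length_append, List.length_cons, List.length_nil] at hlen_cs
              omega) hf2
            omega
          · have hcasc : (u ++ ['s','.']) ∈ TC → ¬ ((['s','.'] : List Char) <+: rest) :=
              fun hT hs => hc2 ⟨hT, hs⟩
            have hA : passesR (c :: t) = nopOf u ++ passesR rest := by
              rw [← hrest]; exact passes_block u hmem rest hcasc
            rw [hA, F_nop u hmem]
            simp only [List.length_append]
            simp only [List.length_cons] at h1 h2 hlen_cs
            have := ih rest f (by omega) (by omega)
            omega

theorem lenLT : ∀ (n : Nat) (cs : List Char) (fuel : Nat),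
    cs.length ≤ n → cs.length ≤ fuel → (∃ tr ∈ TC, tr <:+: cs) →
    (passesR cs).length < (pvScan fuel pvUnitsB cs).length := by
  intro n
  induction n with
  | zero =>
    intro cs fuel h1 _ ⟨tr, htr, hinf⟩
    have : cs = [] := by cases cs <;> simp_all
    subst this
    exact absurd (List.infix_nil.mp hinf) (F_TCne tr htr)
  | succ m ih =>
    intro cs fuel h1 h2 hex
    obtain ⟨tr, htr, hinf⟩ := hex
    cases cs with
    | nil => exact absurd (List.infix_nil.mp hinf) (F_TCne tr htr)
    | cons c t =>
      cases fuel with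
      | zero => simp at h2
      | succ f =>
        cases hfm : pvUnitsB.find? (fun u => u.isPrefixOf (c :: t)) with
        | none =>
          have hnone : ∀ q ∈ pvUnitsB, ¬ q <+: (c :: t) := by
            intro q hq hcon
            have hq2 := List.find?_eq_none.mp hfm q hq
            rw [List.isPrefixOf_iff_prefix] at hq2
            exact hq2 hcon
          have htint : tr <:+: t := by
            obtain ⟨i, hdi⟩ := infix_drop hinf
            cases i with
            | zero =>
              obtain ⟨p, hp, hptr⟩ := F_trighead tr htr
              exact absurd (hptr.trans (by simpa using hdi)) (hnone p hp)
            | succ i' => exact drop_infix i' (by simpa using hdi)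
          rw [passes_cons c t hnone,
            show pvScan (f+1) pvUnitsB (c :: t) = c :: pvScan f pvUnitsB t from by
              rw [pvScan, hfm]]
          simp only [List.length_cons]
          have := ih t f (by simp only [List.length_cons] at h1; omega)
            (by simp only [List.length_cons] at h2; omega) ⟨tr, htr, htint⟩
          omega
        | some u =>
          have hmem : u ∈ pvUnitsB := List.mem_of_find?_eq_some hfm
          have hpreb := List.find?_some hfm
          have hpre : u <+: (c :: t) := List.isPrefixOf_iff_prefix.mp (by simpa using hpreb)
          obtain ⟨rest, hrest⟩ := hpre
          have hne : u ≠ [] := F_nonempty u hmem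
          have hul : 1 ≤ u.length := by cases u <;> simp_all
          have hlen_cs : (c :: t).length = u.length + rest.length := by rw [← hrest]; simp
          have edrop : (c :: t).drop u.length = rest := by rw [← hrest]; simp
          rw [show pvScan (f+1) pvUnitsB (c :: t) =
                u.dropLast ++ pvScan f pvUnitsB ((c :: t).drop u.length) from by
              rw [pvScan, hfm], edrop]
          by_cases hc2 : ((u ++ ['s','.']) ∈ TC ∧ (['s','.'] : List Char) <+: rest)
          · obtain ⟨hTCu, hsp⟩ := hc2
            obtain ⟨y, hy⟩ := hsp
            subst hy
            have hA : passesR (c :: t) = u.dropLast ++ 's' :: passesR y := by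
              rw [← hrest, ← F_nop u hmem]
              exact cascade_block u hmem hTCu y
            have hflen : y.length + 2 ≤ f := by
              simp only [List.length_cons] at h2
              simp only [List.length_append, List.length_cons, List.length_nil] at hlen_cs
              omega
            obtain ⟨f2, hf2, hBs⟩ := scan_sdot f y hflen
            rw [hA, show pvScan f pvUnitsB (['s','.'] ++ y) =
                  's' :: '.' :: pvScan f2 pvUnitsB y from hBs]
            simp only [List.length_append, List.length_cons]
            have := lenLE y.length y f2 le_rfl hf2
            omega
          · -- the trigger must lie wholly inside rest
            have htrest : tr <:+: rest := by
              obtain ⟨i, hdi⟩ := infix_drop (show tr <:+: u ++ rest by rw [hrest]; exact hinf)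
              rcases Nat.lt_or_ge i u.length with hilt | hige
              · rcases Nat.eq_zero_or_pos i with rfl | hipos
                · exfalso
                  rw [List.drop_zero] at hdi
                  have hcompat := prefix_append_cases hdi
                  have heq := F_trigfront u hmem tr htr hcompat
                  apply hc2
                  constructor
                  · rw [← heq]; exact htr
                  · rw [heq] at hdi
                    exact (List.prefix_append_right_inj u).mp hdi
                · exfalso
                  rw [List.drop_append_of_le_length (le_of_lt hilt)] at hdi
                  rcases prefix_append_cases hdi with h1 | h1
                  · exact (F_trigmid u hmem tr htr i hilt hipos).1 h1
                  · exact (F_trigmid u hmem tr htr i hilt hipos).2 h1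
              · obtain ⟨k, rfl⟩ : ∃ k, i = u.length + k := ⟨i - u.length, by omega⟩
                rw [show (u ++ rest).drop (u.length + k) = rest.drop k by
                  simp [List.drop_append]] at hdi
                exact drop_infix k hdi
            have hcasc : (u ++ ['s','.']) ∈ TC → ¬ ((['s','.'] : List Char) <+: rest) :=
              fun hT hs => hc2 ⟨hT, hs⟩
            have hA : passesR (c :: t) = nopOf u ++ passesR rest := by
              rw [← hrest]; exact passes_block u hmem rest hcasc
            rw [hA, F_nop u hmem]
            simp only [List.length_append]
            simp only [List.length_cons] at h1 h2 hlen_cs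
            have := ih rest f (by omega) (by omega) ⟨tr, htr, htrest⟩
            omega

theorem trig_of_D (s : String) (h : D_remove_unit_trailing_period_py s) :
    ∃ tr ∈ TC, tr <:+: s.toList := by
  rcases h with h | h | h | h | h | h
  · exact ⟨"tsp.s.".toList, by simp [TC], (PySem.Str.isIn_iff_infix _ s).mp h⟩
  · exact ⟨"tbsp.s.".toList, by simp [TC], (PySem.Str.isIn_iff_infix _ s).mp h⟩
  · exact ⟨"lb.s.".toList, by simp [TC], (PySem.Str.isIn_iff_infix _ s).mp h⟩
  · exact ⟨"Tsp.s.".toList, by simp [TC], (PySem.Str.isIn_iff_infix _ s).mp h⟩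
  · exact ⟨"Tbsp.s.".toList, by simp [TC], (PySem.Str.isIn_iff_infix _ s).mp h⟩
  · exact ⟨"Lb.s.".toList, by simp [TC], (PySem.Str.isIn_iff_infix _ s).mp h⟩

-- ===== VERDICT (by name: the statement is the Claim_ definition above) =====
theorem remove_unit_trailing_period_py_spec : Claim_unchanged_remove_unit_trailing_period_py := by
  intro s _ hD
  have hnt := noTrig_of_not_D s hD
  rw [portA_eq, passesC_eq_passesR,
    main_lemma s.toList.length s.toList s.toList.length le_rfl le_rfl hnt]
  rfl

set_option maxRecDepth 100000 in
theorem remove_unit_trailing_period_py_changed : Claim_changed_remove_unit_trailing_period_py := by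
  unfold Claim_changed_remove_unit_trailing_period_py; decide

theorem remove_unit_trailing_period_py_tight : Claim_exact_remove_unit_trailing_period_py := by
  intro s _ hD heq
  have hlt := lenLT s.toList.length s.toList s.toList.length le_rfl le_rfl (trig_of_D s hD)
  have h2 : (remove_unit_trailing_period_py s).toList = passesR s.toList := by
    rw [portA_eq, String.toList_ofList, passesC_eq_passesR]
  have h3 : (remove_unit_trailing_period_py_alt s).toList =
      pvScan s.toList.length pvUnitsB s.toList := by
    rw [remove_unit_trailing_period_py_alt, String.toList_ofList]
  rw [heq, h3] at h2
  have := congrArg List.length h2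
  omega
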